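-- pv_equiv track=rewrite | github.com/paulla-rj/GitSafeScanner | scanner/static_repo_scanner.py | normalize_import_matches
-- ===== SOURCE A (Python) =====
-- from typing import List, Set, Dict, Any
--
-- def normalize_import_matches(imports: Set[str], suspicious: Set[str]) -> List[str]:
--     bad = []
--     for imp in imports:
--         for si in suspicious:
--             if imp == si or imp.startswith(si + "."):
--                 bad.append(imp)
--                 break
--     return sorted(set(bad))
-- ===== SOURCE B (Python) =====
-- def normalize_import_matches(imports, suspicious):
--     # Check each import's dotted prefixes against a hash set of suspicious names,
--     # instead of scanning every suspicious name per import.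
--     sus = set(suspicious)
--     bad = {imp for imp in imports
--            if imp in sus or any(imp[i] == '.' and imp[:i] in sus
--                                 for i in range(len(imp)))}
--     return sorted(bad)
-- ===== Notes on version B (the rewrite author's own statement) =====
-- stated objective: faster
-- what changed: Instead of testing every import against every suspicious name with string prefix comparisons, B builds a hash set of suspicious names once and checks each import and each of its dot-delimited prefixes for membership.
import Mathlib
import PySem

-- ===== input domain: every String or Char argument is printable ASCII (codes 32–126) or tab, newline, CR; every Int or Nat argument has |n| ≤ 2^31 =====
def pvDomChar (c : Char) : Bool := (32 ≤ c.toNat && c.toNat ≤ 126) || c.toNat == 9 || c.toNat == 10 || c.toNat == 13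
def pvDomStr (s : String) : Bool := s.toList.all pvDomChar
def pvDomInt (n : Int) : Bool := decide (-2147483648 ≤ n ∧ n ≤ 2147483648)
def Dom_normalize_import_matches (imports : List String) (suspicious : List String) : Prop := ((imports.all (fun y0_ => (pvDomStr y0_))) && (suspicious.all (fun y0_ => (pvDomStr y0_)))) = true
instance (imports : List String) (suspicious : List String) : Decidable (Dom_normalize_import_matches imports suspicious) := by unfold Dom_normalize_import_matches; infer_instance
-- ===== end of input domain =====

-- B replaces A's scan of every suspicious name per import by one hash-set membership
-- test per dot-delimited prefix of each import (objective: faster).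


-- ===== PORT A =====
-- inner 'for si in suspicious: if …: bad.append(imp); break' appends imp once iff some si matches
def normalize_import_matches (imports : List String) (suspicious : List String) : List String :=
  let bad : List String := imports.foldl (fun bad imp =>
    if suspicious.any (fun si => imp == si || PySem.Str.startswith imp (si ++ ".")) then
      bad ++ [imp]
    else bad) []
  PySem.List.sorted (PySem.Set.ofList bad) (fun x => x)

-- ===== PORT B =====
-- 'imp in sus or any(imp[i] == '.' and imp[:i] in sus for i in range(len(imp)))'
-- (imp[i] / imp[:i] taken on the char list; exact since 0 ≤ i < len(imp))
def nimSusHit (sus : PySem.Set String) (imp : String) : Bool :=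
  sus.contains imp ||
    (List.range imp.toList.length).any (fun i =>
      imp.toList.getD i ' ' == '.' && sus.contains (String.ofList (imp.toList.take i)))

def normalize_import_matches_alt (imports : List String) (suspicious : List String) : List String :=
  let sus : PySem.Set String := PySem.Set.ofList suspicious
  let bad : PySem.Set String := PySem.Set.ofList (imports.filter (fun imp => nimSusHit sus imp))
  PySem.List.sorted bad (fun x => x)

-- ===== PRECONDITION & SPEC =====
def Spec_normalize_import_matches (imports : List String) (suspicious : List String) (out : List String) : Prop := out = normalize_import_matches_alt imports suspicious
instance (imports : List String) (suspicious : List String) (out : List String) : Decidable (Spec_normalize_import_matches imports suspicious out) := by unfold Spec_normalize_import_matches; infer_instance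

-- ===== CLAIM (what is proved, stated in full; the proofs are below) =====
def Claim_equal_normalize_import_matches : Prop := ∀ (imports : List String) (suspicious : List String), Dom_normalize_import_matches imports suspicious → Spec_normalize_import_matches imports suspicious (normalize_import_matches imports suspicious)

-- ===== LEMMAS AND PROOFS =====

-- A's per-import condition (∃ suspicious name equal to imp or a dotted prefix of it)
-- coincides with B's (imp or one of its dot-delimited prefixes is a suspicious name).
theorem nim_hit_eq (suspicious : List String) (imp : String) :
    suspicious.any (fun si => imp == si || PySem.Str.startswith imp (si ++ ".")) =
    nimSusHit (PySem.Set.ofList suspicious) imp := by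
  rw [Bool.eq_iff_iff]
  simp only [nimSusHit, List.any_eq_true, Bool.or_eq_true, Bool.and_eq_true, beq_iff_eq,
    PySem.Str.startswith, PySem.Chars.startswith, List.isPrefixOf_iff_prefix,
    String.toList_append, PySem.Set.contains, List.contains_iff_mem, PySem.Set.mem_ofList, List.mem_range]
  constructor
  · rintro ⟨si, hsi, h | h⟩
    · exact Or.inl (h ▸ hsi)
    · refine Or.inr ⟨si.toList.length, ?_, ?_, ?_⟩
      · have := h.length_le; simp [String.length_toList] at this ⊢; omega
      · obtain ⟨t, ht⟩ := h
        have : imp.toList.getD si.toList.length ' ' = (si.toList ++ '.' :: t).getD si.toList.length ' ' := by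
          rw [← ht]; simp
        simpa [List.getD_append_right] using this
      · obtain ⟨t, ht⟩ := h
        rw [← ht]
        simpa using hsi
  · rintro (h | ⟨i, hi, hdot, hmem⟩)
    · exact ⟨imp, h, Or.inl rfl⟩
    · refine ⟨_, hmem, Or.inr ?_⟩
      simp only [String.toList_ofList]
      refine ⟨imp.toList.drop (i+1), ?_⟩
      simp only [show (".").toList = ['.'] from rfl, List.append_assoc, List.singleton_append]
      rw [List.getD_eq_getElem _ _ hi] at hdot
      calc imp.toList.take i ++ '.' :: imp.toList.drop (i+1)
          = imp.toList.take i ++ imp.toList[i] :: imp.toList.drop (i+1) := by rw [hdot]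
        _ = imp.toList.take i ++ imp.toList.drop i := by rw [List.getElem_cons_drop]
        _ = imp.toList := List.take_append_drop _ _

-- ===== VERDICT (by name: the statement is the Claim_ definition above) =====
theorem normalize_import_matches_spec : Claim_equal_normalize_import_matches := by
  intro imports suspicious _
  unfold Spec_normalize_import_matches normalize_import_matches normalize_import_matches_alt
  rw [PySem.List.foldl_append_if_eq_filter, List.nil_append,
    List.filter_congr (fun imp _ => nim_hit_eq suspicious imp)]
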